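-- pv_equiv track=rewrite | github.com/SimchaTeich/Data-Compression-Course | Lecture_09/PPMC.py | encode_symbol
-- ===== SOURCE A (Python) =====
-- def encode_symbol(text, table, s):
--     """
--     text
--     Table table - [{contex:{symbol:count}}]
--     symbol s
--     """
--     e = []
--     for k in range(len(table)-1,-2,-1):
--         if k == -1:
--             e.append((s, k))
--             break
--
--         context = '' if k == 0 else text[-k:]
--
--         if context in table[k]:
--             if s in table[k][context]:
--                 e.append((s, k))
--                 break
--             else:
--                 e.append(('$', k))
--         else:
--             e.append(('$', k))
--
--     return e
-- ===== SOURCE B (Python) =====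
-- def encode_symbol(text, table, s):
--     # Find-then-construct: ascending scan records the highest order whose
--     # context is present and contains s; then the output is built in one shot.
--     n = len(table)
--     kstar = -1
--     for k in range(n):
--         context = '' if k == 0 else text[-k:]
--         inner = table[k].get(context)
--         if inner is not None and s in inner:
--             kstar = k
--     return [('$', j) for j in range(n - 1, kstar, -1)] + [(s, kstar)]
-- ===== Notes on version B (the rewrite author's own statement) =====
-- stated objective: alternative
-- what changed: Replaces A's interleaved emit-escapes-while-scanning loop with break by a find-then-construct decomposition: an ascending scan records the highest order whose context is present and contains s, then the output escape list plus final symbol pair is built in one shot from that order.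
import Mathlib
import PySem

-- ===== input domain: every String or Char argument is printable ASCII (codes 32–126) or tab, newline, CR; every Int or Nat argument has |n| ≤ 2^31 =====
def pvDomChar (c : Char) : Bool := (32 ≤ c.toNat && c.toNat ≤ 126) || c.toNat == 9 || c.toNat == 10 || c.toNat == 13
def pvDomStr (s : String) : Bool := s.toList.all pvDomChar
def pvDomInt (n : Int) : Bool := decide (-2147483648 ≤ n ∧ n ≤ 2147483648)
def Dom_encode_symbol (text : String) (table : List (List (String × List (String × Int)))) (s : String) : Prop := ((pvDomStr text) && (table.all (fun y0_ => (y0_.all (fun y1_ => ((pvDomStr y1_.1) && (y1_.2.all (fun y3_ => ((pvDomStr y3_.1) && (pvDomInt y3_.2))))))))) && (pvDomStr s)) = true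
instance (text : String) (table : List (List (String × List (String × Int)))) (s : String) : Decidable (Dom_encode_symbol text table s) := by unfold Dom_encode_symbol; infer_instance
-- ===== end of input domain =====

-- B replaces A's interleaved emit-while-scanning loop (with break) by a find-then-construct
-- decomposition: one scan computes the highest matching order kstar, then the escape list is
-- built in one shot (objective: alternative decomposition, same cost).

-- shared primitive of both Pythons: does order k's context exist in table[k] and contain s?
-- ('context in table[k]' / table[k].get(context) is first-match lookup on the assoc list; exact)
def pvHit (text : String) (table : List (List (String × List (String × Int)))) (s : String) (k : Int) : Bool :=
  let context := if k = 0 then "" else PySem.Str.slice text (some (-k)) none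
  match (PySem.List.pyGetD table k []).find? (fun p => p.1 == context) with
  | some p => (p.2.find? (fun q => q.1 == s)).isSome
  | none => false

-- ===== PORT A =====
-- the for-loop with break, one recursive step per k in range(len(table)-1, -2, -1),
-- accumulator e as in A
def encode_symbol_loopA (text : String) (table : List (List (String × List (String × Int)))) (s : String) (e : List (String × Int)) : List Int → List (String × Int)
  | [] => e
  | k :: ks =>
    if k = -1 then e ++ [(s, k)]
    else if pvHit text table s k then e ++ [(s, k)]
    else encode_symbol_loopA text table s (e ++ [("$", k)]) ks

def encode_symbol (text : String) (table : List (List (String × List (String × Int)))) (s : String) : List (String × Int) :=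
  encode_symbol_loopA text table s [] (PySem.List.pyRange ((table.length : Int) - 1) (-2) (-1))

-- ===== PORT B =====
def encode_symbol_alt (text : String) (table : List (List (String × List (String × Int)))) (s : String) : List (String × Int) :=
  let n : Int := table.length
  let kstar : Int := (PySem.List.pyRange 0 n 1).foldl (fun acc k => if pvHit text table s k then k else acc) (-1)
  (PySem.List.pyRange (n - 1) kstar (-1)).map (fun j => ("$", j)) ++ [(s, kstar)]

-- ===== PRECONDITION & SPEC =====
def Spec_encode_symbol (text : String) (table : List (List (String × List (String × Int)))) (s : String) (out : List (String × Int)) : Prop := out = encode_symbol_alt text table s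
instance (text : String) (table : List (List (String × List (String × Int)))) (s : String) (out : List (String × Int)) : Decidable (Spec_encode_symbol text table s out) := by unfold Spec_encode_symbol; infer_instance

-- ===== CLAIM (what is proved, stated in full; the proofs are below) =====
def Claim_equal_encode_symbol : Prop := ∀ (text : String) (table : List (List (String × List (String × Int)))) (s : String), Dom_encode_symbol text table s → Spec_encode_symbol text table s (encode_symbol text table s)

-- ===== LEMMAS AND PROOFS =====

-- common normal form: what both ports compute for m orders, by recursion on m
def pvSpecF (P : Int → Bool) (s : String) : Nat → List (String × Int)
  | 0 => [(s, -1)]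
  | m + 1 => if P m then [(s, (m : Int))] else ("$", (m : Int)) :: pvSpecF P s m

theorem loopA_eq_specF (text : String) (table : List (List (String × List (String × Int)))) (s : String) (m : Nat) (e : List (String × Int)) :
    encode_symbol_loopA text table s e (PySem.List.pyRange ((m : Int) - 1) (-2) (-1)) = e ++ pvSpecF (pvHit text table s) s m := by
  induction m generalizing e with
  | zero =>
    rw [show ((0 : Nat) : Int) - 1 = -1 by norm_num,
        PySem.List.pyRange_neg_one_cons (by norm_num), PySem.List.pyRange_neg_one_eq_nil (by norm_num)]
    simp [encode_symbol_loopA, pvSpecF]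
  | succ m ih =>
    rw [show ((m + 1 : Nat) : Int) - 1 = (m : Int) by push_cast; ring,
        PySem.List.pyRange_neg_one_cons (by omega)]
    have hm : (m : Int) ≠ -1 := by omega
    by_cases h : pvHit text table s m
    · simp [encode_symbol_loopA, hm, h, pvSpecF]
    · simp only [encode_symbol_loopA, hm, h, if_false]
      rw [ih]
      simp [pvSpecF, h]

-- the ascending fold of B: value and bounds
def pvK (P : Int → Bool) (m : Nat) : Int :=
  (PySem.List.pyRange 0 (m : Int) 1).foldl (fun acc k => if P k then k else acc) (-1)

theorem pvK_zero (P : Int → Bool) : pvK P 0 = -1 := by simp [pvK]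

theorem pvK_succ (P : Int → Bool) (m : Nat) :
    pvK P (m + 1) = if P m then (m : Int) else pvK P m := by
  unfold pvK
  rw [show ((m + 1 : Nat) : Int) = (m : Int) + 1 by push_cast; ring,
      PySem.List.pyRange_one_succ_right (by positivity)]
  simp

theorem pvK_bounds (P : Int → Bool) (m : Nat) : -1 ≤ pvK P m ∧ pvK P m < m := by
  induction m with
  | zero => simp [pvK_zero]
  | succ m ih =>
    rw [pvK_succ]
    by_cases h : P m <;> simp [h] <;> omega

theorem construct_eq_specF (P : Int → Bool) (s : String) (m : Nat) :
    (PySem.List.pyRange ((m : Int) - 1) (pvK P m) (-1)).map (fun j => ("$", j)) ++ [(s, pvK P m)] = pvSpecF P s m := by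
  induction m with
  | zero =>
    rw [pvK_zero, show ((0 : Nat) : Int) - 1 = -1 by norm_num, PySem.List.pyRange_neg_one_eq_nil (by norm_num)]
    simp [pvSpecF]
  | succ m ih =>
    rw [pvK_succ]
    by_cases h : P m
    · rw [if_pos h, show ((m + 1 : Nat) : Int) - 1 = (m : Int) by push_cast; ring,
          PySem.List.pyRange_neg_one_eq_nil (by omega)]
      simp [pvSpecF, h]
    · have hb := pvK_bounds P m
      rw [if_neg h, show ((m + 1 : Nat) : Int) - 1 = (m : Int) by push_cast; ring,
          PySem.List.pyRange_neg_one_cons (by omega)]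
      simp only [List.map_cons, List.cons_append]
      rw [ih]
      simp [pvSpecF, h]

-- ===== VERDICT (by name: the statement is the Claim_ definition above) =====
theorem encode_symbol_spec : Claim_equal_encode_symbol := by
  intro text table s _
  unfold Spec_encode_symbol encode_symbol encode_symbol_alt
  rw [loopA_eq_specF text table s table.length [], ← construct_eq_specF (pvHit text table s) s table.length]
  simp only [List.nil_append]
  rfl
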